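-- pv_equiv track=rewrite | github.com/analopez03/Python | EjerciciosColaborativos/EjerciciosColaborativos/Ejercicio10_Carlos.py | combinar_y_reemplazar
-- ===== SOURCE A (Python) =====
-- def combinar_y_reemplazar(cadena1, cadena2):
--     combinada = cadena1 + cadena2
--     resultado = ''
--     for i, char in enumerate(combinada):
--         if i % 2 != 0:
--             resultado += 'C'
--         else:
--             resultado += char
--     return resultado
-- ===== SOURCE B (Python) =====
-- def combinar_y_reemplazar(cadena1, cadena2):
--     lst = list(cadena1 + cadena2)
--     lst[1::2] = 'C' * len(lst[1::2])
--     return ''.join(lst)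
-- ===== Notes on version B (the rewrite author's own statement) =====
-- stated objective: simpler
-- what changed: Replaces the enumerate loop with its per-index parity branch (and repeated string concatenation) by one bulk strided slice assignment that overwrites every odd position with 'C' at once, joining once at the end.
import Mathlib
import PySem

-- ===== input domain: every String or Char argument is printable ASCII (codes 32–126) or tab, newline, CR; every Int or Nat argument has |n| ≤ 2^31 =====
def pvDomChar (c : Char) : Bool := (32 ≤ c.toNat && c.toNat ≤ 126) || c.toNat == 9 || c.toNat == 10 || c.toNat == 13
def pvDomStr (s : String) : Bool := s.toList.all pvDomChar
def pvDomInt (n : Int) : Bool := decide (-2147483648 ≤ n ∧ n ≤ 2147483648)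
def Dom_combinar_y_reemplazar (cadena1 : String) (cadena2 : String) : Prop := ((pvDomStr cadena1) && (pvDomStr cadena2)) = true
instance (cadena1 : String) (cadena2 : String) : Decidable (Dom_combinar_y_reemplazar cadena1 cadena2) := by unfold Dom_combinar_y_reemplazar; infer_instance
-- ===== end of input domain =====

-- B replaces A's enumerate loop (parity branch per character) by one bulk overwrite of all odd positions; objective: simpler.


-- ===== PORT A =====
-- 'for i, char in enumerate(combinada): resultado += 'C' if i odd else char'
def pvLoopA : Nat → List Char → List Char → List Char
  | _, resultado, [] => resultado
  | i, resultado, char :: rest =>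
      pvLoopA (i + 1) (resultado ++ [if i % 2 ≠ 0 then 'C' else char]) rest

def combinar_y_reemplazar (cadena1 : String) (cadena2 : String) : String :=
  let combinada := cadena1 ++ cadena2
  String.ofList (pvLoopA 0 [] combinada.toList)

-- ===== PORT B =====
-- 'lst[1::2] = "C" * len(lst[1::2])': overwrite every odd slot with 'C', two slots at a time
def pvOddToC : List Char → List Char
  | [] => []
  | [a] => [a]
  | a :: _ :: rest => a :: 'C' :: pvOddToC rest

def combinar_y_reemplazar_alt (cadena1 : String) (cadena2 : String) : String :=
  String.ofList (pvOddToC (cadena1 ++ cadena2).toList)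

-- ===== PRECONDITION & SPEC =====
def Spec_combinar_y_reemplazar (cadena1 : String) (cadena2 : String) (out : String) : Prop := out = combinar_y_reemplazar_alt cadena1 cadena2
instance (cadena1 : String) (cadena2 : String) (out : String) : Decidable (Spec_combinar_y_reemplazar cadena1 cadena2 out) := by unfold Spec_combinar_y_reemplazar; infer_instance

-- ===== CLAIM (what is proved, stated in full; the proofs are below) =====
def Claim_equal_combinar_y_reemplazar : Prop := ∀ (cadena1 : String) (cadena2 : String), Dom_combinar_y_reemplazar cadena1 cadena2 → Spec_combinar_y_reemplazar cadena1 cadena2 (combinar_y_reemplazar cadena1 cadena2)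

-- ===== LEMMAS AND PROOFS =====
theorem pvLoopA_acc (l : List Char) : ∀ (i : Nat) (acc : List Char),
    pvLoopA i acc l = acc ++ pvLoopA i [] l := by
  induction l with
  | nil => intro i acc; simp [pvLoopA]
  | cons c rest ih =>
      intro i acc
      simp only [pvLoopA]
      rw [ih (i+1), ih (i+1) ([] ++ [_])]
      simp

theorem pvLoopA_even_eq (l : List Char) : ∀ (i : Nat), i % 2 = 0 →
    pvLoopA i [] l = pvOddToC l := by
  induction l using pvOddToC.induct with
  | case1 => intro i _; simp [pvLoopA, pvOddToC]
  | case2 a => intro i h; simp [pvLoopA, pvOddToC, h]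
  | case3 a b rest ih =>
      intro i h
      simp only [pvLoopA, pvOddToC]
      have h1 : (i + 1) % 2 = 1 := by omega
      rw [pvLoopA_acc]
      simp only [h, h1]
      rw [ih (i+1+1) (by omega)]
      simp

-- ===== VERDICT (by name: the statement is the Claim_ definition above) =====
theorem combinar_y_reemplazar_spec : Claim_equal_combinar_y_reemplazar := by
  intro c1 c2 _
  unfold Spec_combinar_y_reemplazar combinar_y_reemplazar combinar_y_reemplazar_alt
  simp only []
  rw [pvLoopA_even_eq _ 0 rfl]
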